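-- pv_equiv track=rewrite | github.com/HasanBradfordUni/myPublicFiles | Portfolio/Python Apps/Football chess/Football_chess V12.py | ST_moves
-- ===== SOURCE A (Python) =====
-- def ST_moves(moveFromX, moveFromY, moveToX, moveToY, size, player1Turn, player2Turn):
--     possibleMoves = []
--
--     moveDif = ((moveToX - moveFromX),(moveToY - moveFromY))
--
--     for x in range(size):
--         possibleMoves.append((x,0))
--         possibleMoves.append((-x,0))
--
--     for y in range(size):
--         possibleMoves.append((0,y))
--         possibleMoves.append((0,-y))
--
--     for x in range(size):
--         for y in range(size):
--             if x == y:
--                 possibleMoves.append((-x,-y))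
--                 possibleMoves.append((-x,y))
--                 possibleMoves.append((x,-y))
--                 possibleMoves.append((x,y))
--
--     if moveDif in possibleMoves:
--         return True
--     else:
--         return False
-- ===== SOURCE B (Python) =====
-- def ST_moves(moveFromX, moveFromY, moveToX, moveToY, size, player1Turn, player2Turn):
--     dx = moveToX - moveFromX
--     dy = moveToY - moveFromY
--     if size <= 0:
--         return False
--     return (dy == 0 and abs(dx) < size) or \
--            (dx == 0 and abs(dy) < size) or \
--            (abs(dx) == abs(dy) and abs(dx) < size)
-- ===== Notes on version B (the rewrite author's own statement) =====
-- stated objective: faster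
-- what changed: Replaces the O(size^2) construction of a list of all queen-style offsets followed by a membership test with a direct O(1) arithmetic test on dx/dy (straight or diagonal, offset magnitude < size).
import Mathlib
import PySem

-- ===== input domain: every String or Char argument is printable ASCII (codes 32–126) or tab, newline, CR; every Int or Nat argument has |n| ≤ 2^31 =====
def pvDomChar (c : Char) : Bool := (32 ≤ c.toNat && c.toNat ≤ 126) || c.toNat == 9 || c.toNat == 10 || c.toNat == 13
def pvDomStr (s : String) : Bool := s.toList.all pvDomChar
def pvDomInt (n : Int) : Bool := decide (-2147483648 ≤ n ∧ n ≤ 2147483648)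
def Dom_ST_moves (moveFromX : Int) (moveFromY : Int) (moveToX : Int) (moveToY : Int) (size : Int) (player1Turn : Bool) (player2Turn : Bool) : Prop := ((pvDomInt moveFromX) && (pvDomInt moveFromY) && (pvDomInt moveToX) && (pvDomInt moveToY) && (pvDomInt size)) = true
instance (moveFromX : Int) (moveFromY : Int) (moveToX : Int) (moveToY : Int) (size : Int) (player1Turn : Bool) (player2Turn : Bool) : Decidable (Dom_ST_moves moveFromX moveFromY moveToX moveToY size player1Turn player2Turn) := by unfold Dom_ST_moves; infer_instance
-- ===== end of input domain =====

-- B replaces A's O(size^2) offset-list build + membership test with a direct O(1) arithmetic test on (dx, dy).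


-- ===== PORT A =====
def ST_moves (moveFromX : Int) (moveFromY : Int) (moveToX : Int) (moveToY : Int) (size : Int) (player1Turn : Bool) (player2Turn : Bool) : Bool :=
  let possibleMoves : List (Int × Int) := []
  let moveDif : Int × Int := (moveToX - moveFromX, moveToY - moveFromY)
  let possibleMoves := (PySem.List.pyRange 0 size 1).foldl
    (fun acc x => (acc ++ [(x, (0 : Int))]) ++ [(-x, (0 : Int))]) possibleMoves
  let possibleMoves := (PySem.List.pyRange 0 size 1).foldl
    (fun acc y => (acc ++ [((0 : Int), y)]) ++ [((0 : Int), -y)]) possibleMoves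
  let possibleMoves := (PySem.List.pyRange 0 size 1).foldl
    (fun acc x => (PySem.List.pyRange 0 size 1).foldl
      (fun acc2 y =>
        if x == y then
          (((acc2 ++ [(-x, -y)]) ++ [(-x, y)]) ++ [(x, -y)]) ++ [(x, y)]
        else acc2) acc) possibleMoves
  if possibleMoves.contains moveDif then true else false

-- ===== PORT B =====
def ST_moves_alt (moveFromX : Int) (moveFromY : Int) (moveToX : Int) (moveToY : Int) (size : Int) (player1Turn : Bool) (player2Turn : Bool) : Bool :=
  let dx := moveToX - moveFromX
  let dy := moveToY - moveFromY
  if size ≤ 0 then false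
  else (dy == 0 && decide (|dx| < size)) ||
       (dx == 0 && decide (|dy| < size)) ||
       (|dx| == |dy| && decide (|dx| < size))

-- ===== PRECONDITION & SPEC =====
def Spec_ST_moves (moveFromX : Int) (moveFromY : Int) (moveToX : Int) (moveToY : Int) (size : Int) (player1Turn : Bool) (player2Turn : Bool) (out : Bool) : Prop := out = ST_moves_alt moveFromX moveFromY moveToX moveToY size player1Turn player2Turn
instance (moveFromX : Int) (moveFromY : Int) (moveToX : Int) (moveToY : Int) (size : Int) (player1Turn : Bool) (player2Turn : Bool) (out : Bool) : Decidable (Spec_ST_moves moveFromX moveFromY moveToX moveToY size player1Turn player2Turn out) := by unfold Spec_ST_moves; infer_instance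

-- ===== CLAIM (what is proved, stated in full; the proofs are below) =====
def Claim_equal_ST_moves : Prop := ∀ (moveFromX : Int) (moveFromY : Int) (moveToX : Int) (moveToY : Int) (size : Int) (player1Turn : Bool) (player2Turn : Bool), Dom_ST_moves moveFromX moveFromY moveToX moveToY size player1Turn player2Turn → Spec_ST_moves moveFromX moveFromY moveToX moveToY size player1Turn player2Turn (ST_moves moveFromX moveFromY moveToX moveToY size player1Turn player2Turn)

-- ===== LEMMAS AND PROOFS =====

-- the list A builds, expressed with flatMap
def pvL (s : Int) : List (Int × Int) :=
  (PySem.List.pyRange 0 s 1).flatMap (fun x => [(x, (0:Int)), (-x, 0)]) ++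
  (PySem.List.pyRange 0 s 1).flatMap (fun y => [((0:Int), y), (0, -y)]) ++
  (PySem.List.pyRange 0 s 1).flatMap (fun x =>
    (PySem.List.pyRange 0 s 1).flatMap
      (fun y => if x = y then [(-x, -y), (-x, y), (x, -y), (x, y)] else []))

-- A's three loops build exactly pvL s
theorem pv_build (s : Int) :
    (PySem.List.pyRange 0 s 1).foldl
      (fun acc x => (PySem.List.pyRange 0 s 1).foldl
        (fun acc2 y =>
          if x == y then
            (((acc2 ++ [(-x, -y)]) ++ [(-x, y)]) ++ [(x, -y)]) ++ [(x, y)]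
          else acc2) acc)
      ((PySem.List.pyRange 0 s 1).foldl
        (fun acc y => (acc ++ [((0 : Int), y)]) ++ [((0 : Int), -y)])
        ((PySem.List.pyRange 0 s 1).foldl
          (fun acc x => (acc ++ [(x, (0 : Int))]) ++ [(-x, (0 : Int))]) ([] : List (Int × Int))))
    = pvL s := by
  have h1 : (PySem.List.pyRange 0 s 1).foldl
      (fun acc x => (acc ++ [(x, (0 : Int))]) ++ [(-x, (0 : Int))]) ([] : List (Int × Int))
      = (PySem.List.pyRange 0 s 1).flatMap (fun x => [(x, (0:Int)), (-x, 0)]) := by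
    have := PySem.List.foldl_append_eq_flatMap
      (l := PySem.List.pyRange 0 s 1) (g := fun x => [(x, (0:Int)), (-x, 0)])
      (acc := ([] : List (Int × Int)))
    simpa using this
  rw [h1]
  have h2 : ∀ init : List (Int × Int), (PySem.List.pyRange 0 s 1).foldl
      (fun acc y => (acc ++ [((0 : Int), y)]) ++ [((0 : Int), -y)]) init
      = init ++ (PySem.List.pyRange 0 s 1).flatMap (fun y => [((0:Int), y), (0, -y)]) := by
    intro init
    have := PySem.List.foldl_append_eq_flatMap
      (l := PySem.List.pyRange 0 s 1) (g := fun y => [((0:Int), y), (0, -y)]) (acc := init)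
    simpa using this
  rw [h2]
  have hin : ∀ (x : Int) (acc : List (Int × Int)),
      (PySem.List.pyRange 0 s 1).foldl
        (fun acc2 y =>
          if x == y then
            (((acc2 ++ [(-x, -y)]) ++ [(-x, y)]) ++ [(x, -y)]) ++ [(x, y)]
          else acc2) acc
      = acc ++ (PySem.List.pyRange 0 s 1).flatMap
          (fun y => if x = y then [(-x, -y), (-x, y), (x, -y), (x, y)] else []) := by
    intro x acc
    have hc := PySem.List.foldl_congr_mem
      (l := PySem.List.pyRange 0 s 1)
      (f := fun acc2 y =>
        if x == y then
          (((acc2 ++ [(-x, -y)]) ++ [(-x, y)]) ++ [(x, -y)]) ++ [(x, y)]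
        else acc2)
      (g := fun acc2 y =>
        acc2 ++ (if x = y then [(-x, -y), (-x, y), (x, -y), (x, y)] else []))
      (init := acc)
      (by intro acc2 y _; by_cases h : x = y <;> simp [h])
    rw [hc]
    exact PySem.List.foldl_append_eq_flatMap _ _ _
  have hout := PySem.List.foldl_congr_mem
    (l := PySem.List.pyRange 0 s 1)
    (f := fun acc x => (PySem.List.pyRange 0 s 1).foldl
        (fun acc2 y =>
          if x == y then
            (((acc2 ++ [(-x, -y)]) ++ [(-x, y)]) ++ [(x, -y)]) ++ [(x, y)]
          else acc2) acc)
    (g := fun acc x => acc ++ (PySem.List.pyRange 0 s 1).flatMap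
          (fun y => if x = y then [(-x, -y), (-x, y), (x, -y), (x, y)] else []))
    (init := (PySem.List.pyRange 0 s 1).flatMap (fun x => [(x, (0:Int)), (-x, 0)]) ++
      (PySem.List.pyRange 0 s 1).flatMap (fun y => [((0:Int), y), (0, -y)]))
    (by intro acc x _; exact hin x acc)
  rw [hout, PySem.List.foldl_append_eq_flatMap, pvL, List.append_assoc]

-- membership in pvL is exactly B's arithmetic condition
theorem pv_mem (dx dy s : Int) :
    (dx, dy) ∈ pvL s ↔
      (0 < s ∧ ((dy = 0 ∧ |dx| < s) ∨ (dx = 0 ∧ |dy| < s) ∨ (|dx| = |dy| ∧ |dx| < s))) := by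
  simp only [pvL, List.mem_append, List.mem_flatMap, PySem.List.mem_pyRange_one]
  constructor
  · rintro ((⟨x, ⟨hx0, hxs⟩, hm⟩ | ⟨y, ⟨hy0, hys⟩, hm⟩) | ⟨x, ⟨hx0, hxs⟩, y, ⟨hy0, hys⟩, hm⟩)
    · rcases (by simpa [Prod.ext_iff] using hm :
        (dx = x ∧ dy = 0) ∨ (dx = -x ∧ dy = 0)) with ⟨h1, h2⟩ | ⟨h1, h2⟩ <;>
        exact ⟨by omega, Or.inl ⟨h2, by rw [h1]; rw [abs_lt]; omega⟩⟩
    · rcases (by simpa [Prod.ext_iff] using hm :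
        (dx = 0 ∧ dy = y) ∨ (dx = 0 ∧ dy = -y)) with ⟨h1, h2⟩ | ⟨h1, h2⟩ <;>
        exact ⟨by omega, Or.inr (Or.inl ⟨h1, by rw [h2]; rw [abs_lt]; omega⟩)⟩
    · by_cases hxy : x = y
      · subst hxy
        rcases (by simpa [Prod.ext_iff] using hm :
          (dx = -x ∧ dy = -x) ∨ (dx = -x ∧ dy = x) ∨ (dx = x ∧ dy = -x) ∨ (dx = x ∧ dy = x)) with
          ⟨h1, h2⟩ | ⟨h1, h2⟩ | ⟨h1, h2⟩ | ⟨h1, h2⟩ <;>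
          refine ⟨by omega, Or.inr (Or.inr ⟨?_, ?_⟩)⟩ <;>
            simp only [h1, h2, abs_neg, abs_lt] <;> omega
      · simp [hxy] at hm
  · rintro ⟨hs, h⟩
    rcases h with ⟨h0, hlt⟩ | ⟨h0, hlt⟩ | ⟨heq, hlt⟩
    · refine Or.inl (Or.inl ⟨|dx|, ⟨abs_nonneg dx, hlt⟩, ?_⟩)
      simp only [List.mem_cons, List.not_mem_nil, Prod.mk.injEq, or_false]
      rcases abs_choice dx with ha | ha <;> omega
    · refine Or.inl (Or.inr ⟨|dy|, ⟨abs_nonneg dy, hlt⟩, ?_⟩)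
      simp only [List.mem_cons, List.not_mem_nil, Prod.mk.injEq, or_false]
      rcases abs_choice dy with ha | ha <;> omega
    · refine Or.inr ⟨|dx|, ⟨abs_nonneg dx, hlt⟩, |dx|, ⟨abs_nonneg dx, hlt⟩, ?_⟩
      rw [if_pos rfl]
      simp only [List.mem_cons, List.not_mem_nil, Prod.mk.injEq, or_false]
      rcases abs_choice dx with ha | ha <;> rcases abs_choice dy with hb | hb <;> omega

-- ===== VERDICT (by name: the statement is the Claim_ definition above) =====
theorem ST_moves_spec : Claim_equal_ST_moves := by
  intro mfx mfy mtx mty s p1 p2 _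
  unfold Spec_ST_moves ST_moves ST_moves_alt
  simp only []
  rw [pv_build]
  rw [show ∀ b : Bool, (if b = true then true else false) = b from fun b => by cases b <;> rfl]
  by_cases hs : s ≤ 0
  · simp [pvL, PySem.List.pyRange_one_eq_nil hs, hs]
  · rw [if_neg hs]
    rw [Bool.eq_iff_iff]
    rw [List.contains_iff_mem, pv_mem]
    simp only [Bool.or_eq_true, Bool.and_eq_true, beq_iff_eq, decide_eq_true_eq]
    constructor
    · rintro ⟨_, h⟩; tauto
    · intro h; exact ⟨by omega, by tauto⟩
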